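-- pv_equiv track=rewrite | github.com/automl/learna_tools | learna_tools/liblearna/data/translate_balanced_data_for_learna.py | convert_structure
-- ===== SOURCE A (Python) =====
-- def convert_structure(secondary):
--     stack = []
--     new_struc = []
--     for index, value in enumerate(secondary):
--         if value == '(':
--             stack.append(index)
--             new_struc.append(f"{value}{index}")
--         elif value == ')':
--             pairing_partner = stack.pop()
--             new_struc.append(f"{value}{pairing_partner}")
--         else:
--             new_struc.append(value)
--     return ''.join(new_struc)
-- ===== SOURCE B (Python) =====
-- def convert_structure(secondary):
--     # pass 1: build the pairing table close_index -> open_index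
--     partner = {}
--     stack = []
--     for i, c in enumerate(secondary):
--         if c == '(':
--             stack.append(i)
--         elif c == ')':
--             partner[i] = stack.pop()
--     # pass 2: render every position from the finished table
--     return ''.join(
--         f"({i}" if c == '(' else (f"){partner[i]}" if c == ')' else c)
--         for i, c in enumerate(secondary)
--     )
-- ===== Notes on version B (the rewrite author's own statement) =====
-- stated objective: alternative
-- what changed: A interleaves matching and rendering in one fold over (stack, output chunks); B first builds the complete close-index -> open-index pairing table with a stack pass, then renders the whole string in an independent second pass from that table.
import Mathlib
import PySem

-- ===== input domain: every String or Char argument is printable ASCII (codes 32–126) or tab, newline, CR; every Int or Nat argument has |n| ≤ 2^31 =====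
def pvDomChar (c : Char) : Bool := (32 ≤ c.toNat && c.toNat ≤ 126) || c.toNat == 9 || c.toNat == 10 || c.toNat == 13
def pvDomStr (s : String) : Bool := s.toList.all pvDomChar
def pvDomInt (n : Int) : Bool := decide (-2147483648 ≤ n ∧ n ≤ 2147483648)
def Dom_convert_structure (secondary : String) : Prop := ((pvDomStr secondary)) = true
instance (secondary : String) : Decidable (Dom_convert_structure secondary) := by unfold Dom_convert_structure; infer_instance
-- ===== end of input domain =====

-- B is a two-pass re-implementation (build the full pairing table, then render); objective: alternative decomposition, same cost.

-- ===== PORT A =====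
-- One fold carrying (stack, output chunks); stack.pop() on an empty stack raises IndexError in Python
-- (excluded by Pre_), the port uses the junk partner -1 there.
def pvAStep (st : List Int × List String) (p : Int × Char) : List Int × List String :=
  if p.2 = '(' then (p.1 :: st.1, st.2 ++ ["(" ++ PySem.Int.toStr p.1])
  else if p.2 = ')' then
    match st.1 with
    | [] => ([], st.2 ++ [")" ++ PySem.Int.toStr (-1)])
    | q :: rest => (rest, st.2 ++ [")" ++ PySem.Int.toStr q])
  else (st.1, st.2 ++ [String.ofList [p.2]])

def convert_structure (secondary : String) : String :=
  PySem.Str.join "" ((PySem.List.enumerate secondary.toList 0).foldl pvAStep ([], [])).2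

-- ===== PORT B =====
-- Pass 1: record partner[close] = matching open index (unmatched ')' is skipped here;
-- Python raises there, excluded by Pre_).
def pvBPairs : List (Int × Char) → List Int → PySem.Dict Int Int → PySem.Dict Int Int
  | [], _, d => d
  | (i, c) :: t, stack, d =>
    if c = '(' then pvBPairs t (i :: stack) d
    else if c = ')' then
      match stack with
      | [] => pvBPairs t [] d
      | q :: rest => pvBPairs t rest (d.insert i q)
    else pvBPairs t stack d

-- Pass 2: render one position from the finished table (missing key defaults to 0; Python raises
-- KeyError there, excluded by Pre_).
def pvBRender (d : PySem.Dict Int Int) (p : Int × Char) : String :=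
  if p.2 = '(' then "(" ++ PySem.Int.toStr p.1
  else if p.2 = ')' then ")" ++ PySem.Int.toStr (d.getD p.1 0)
  else String.ofList [p.2]

def convert_structure_alt (secondary : String) : String :=
  let e := PySem.List.enumerate secondary.toList 0
  PySem.Str.join "" (e.map (pvBRender (pvBPairs e [] PySem.Dict.empty)))

-- ===== PRECONDITION & SPEC =====
-- Pre_ excludes exactly the strings with an unmatched ')' (some prefix has more ')' than '('),
-- on which the Python A raises IndexError from stack.pop().
def Pre_convert_structure (secondary : String) : Prop :=
  ∀ k ∈ List.range (secondary.toList.length + 1),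
    (secondary.toList.take k).count ')' ≤ (secondary.toList.take k).count '('
instance (secondary : String) : Decidable (Pre_convert_structure secondary) := by
  unfold Pre_convert_structure; infer_instance

def pvWitness_convert_structure : String := "(.(x))"

def Spec_convert_structure (secondary : String) (out : String) : Prop := out = convert_structure_alt secondary
instance (secondary : String) (out : String) : Decidable (Spec_convert_structure secondary out) := by unfold Spec_convert_structure; infer_instance

-- ===== CLAIM (what is proved, stated in full; the proofs are below) =====
def Claim_equal_convert_structure : Prop := ∀ (secondary : String), Dom_convert_structure secondary → Pre_convert_structure secondary → Spec_convert_structure secondary (convert_structure secondary)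

-- ===== LEMMAS AND PROOFS =====

-- later insertions of other keys never shadow a present key (lookup is first match / unique keys)
lemma pvShadow (t : List (Int × Char)) (s : List Int) (d : PySem.Dict Int Int) (i : Int)
    (h : ∀ p ∈ t, p.1 ≠ i) : (pvBPairs t s d).get? i = d.get? i := by
  induction t generalizing s d with
  | nil => rfl
  | cons p t ih =>
    obtain ⟨j, c⟩ := p
    have hj : j ≠ i := h (j, c) (by simp)
    have ht : ∀ q ∈ t, q.1 ≠ i := fun q hq => h q (by simp [hq])
    by_cases h1 : c = '('
    · simpa [pvBPairs, h1] using ih (j :: s) d ht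
    · by_cases h2 : c = ')'
      · cases s with
        | nil => simpa [pvBPairs, h1, h2] using ih [] d ht
        | cons q rest =>
          have hstep : pvBPairs ((j, c) :: t) (q :: rest) d = pvBPairs t rest (d.insert j q) := by
            simp [pvBPairs, h2]
          rw [hstep, ih rest (d.insert j q) ht, PySem.Dict.get?_insert_of_ne d q (Ne.symm hj)]
      · simpa [pvBPairs, h1, h2] using ih s d ht

lemma pvMain (l : List (Int × Char)) (s : List Int) (d : PySem.Dict Int Int) (acc : List String)
    (hpair : l.Pairwise (fun p q => p.1 < q.1))
    (hd : ∀ p ∈ l, d.get? p.1 = none)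
    (hbal : ∀ k : Nat, ((l.take k).map Prod.snd).count ')' ≤ s.length + ((l.take k).map Prod.snd).count '(') :
    (l.foldl pvAStep (s, acc)).2 = acc ++ l.map (pvBRender (pvBPairs l s d)) := by
  induction l generalizing s d acc with
  | nil => simp
  | cons p t ih =>
    obtain ⟨i, c⟩ := p
    have hpt : t.Pairwise (fun p q => p.1 < q.1) := hpair.of_cons
    have hgt : ∀ q ∈ t, i < q.1 := fun q hq => (List.pairwise_cons.1 hpair).1 q hq
    by_cases h1 : c = '('
    · have hbal' : ∀ k : Nat, ((t.take k).map Prod.snd).count ')' ≤ (i :: s).length + ((t.take k).map Prod.snd).count '(' := by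
        intro k
        have := hbal (k + 1)
        simp [h1] at this ⊢
        omega
      have hrec := ih (i :: s) d (acc ++ ["(" ++ PySem.Int.toStr i]) hpt
        (fun q hq => hd q (by simp [hq])) hbal'
      have hstep : pvBPairs ((i, c) :: t) s d = pvBPairs t (i :: s) d := by simp [pvBPairs, h1]
      have hfold : List.foldl pvAStep (s, acc) ((i, c) :: t)
          = List.foldl pvAStep (i :: s, acc ++ ["(" ++ PySem.Int.toStr i]) t := by
        simp [pvAStep, h1]
      have hrend : pvBRender (pvBPairs ((i, c) :: t) s d) (i, c) = "(" ++ PySem.Int.toStr i := by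
        simp [pvBRender, h1]
      rw [hfold, hrec, List.map_cons, hrend, hstep]
      simp
    · by_cases h2 : c = ')'
      · have hs : s ≠ [] := by
          have := hbal 1
          simp [h2] at this
          intro h; rw [h] at this; simp at this
        obtain ⟨q, rest, rfl⟩ := List.exists_cons_of_ne_nil hs
        have hbal' : ∀ k : Nat, ((t.take k).map Prod.snd).count ')' ≤ rest.length + ((t.take k).map Prod.snd).count '(' := by
          intro k
          have := hbal (k + 1)
          simp [h2] at this ⊢
          omega
        have hd' : ∀ p ∈ t, (d.insert i q).get? p.1 = none := by
          intro p hp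
          rw [PySem.Dict.get?_insert_of_ne d q (hgt p hp).ne']
          exact hd p (by simp [hp])
        have hstep : pvBPairs ((i, c) :: t) (q :: rest) d = pvBPairs t rest (d.insert i q) := by
          simp [pvBPairs, h2]
        have hlook : (pvBPairs t rest (d.insert i q)).getD i 0 = q := by
          have hsh := pvShadow t rest (d.insert i q) i (fun p hp => (hgt p hp).ne')
          rw [PySem.Dict.get?_insert_self] at hsh
          exact PySem.Dict.getD_of_get?_eq_some _ 0 hsh
        have hrec := ih rest (d.insert i q) (acc ++ [")" ++ PySem.Int.toStr q]) hpt hd' hbal'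
        have hfold : List.foldl pvAStep (q :: rest, acc) ((i, c) :: t)
            = List.foldl pvAStep (rest, acc ++ [")" ++ PySem.Int.toStr q]) t := by
          simp [pvAStep, h2]
        have hrend : pvBRender (pvBPairs ((i, c) :: t) (q :: rest) d) (i, c) = ")" ++ PySem.Int.toStr q := by
          rw [hstep]; simp [pvBRender, h2, hlook]
        rw [hfold, hrec, List.map_cons, hrend, hstep]
        simp
      · have hbal' : ∀ k : Nat, ((t.take k).map Prod.snd).count ')' ≤ s.length + ((t.take k).map Prod.snd).count '(' := by
          intro k
          have := hbal (k + 1)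
          simp [h1, h2] at this ⊢
          omega
        have hrec := ih s d (acc ++ [String.ofList [c]]) hpt (fun q hq => hd q (by simp [hq])) hbal'
        have hstep : pvBPairs ((i, c) :: t) s d = pvBPairs t s d := by simp [pvBPairs, h1, h2]
        have hfold : List.foldl pvAStep (s, acc) ((i, c) :: t)
            = List.foldl pvAStep (s, acc ++ [String.ofList [c]]) t := by
          simp [pvAStep, h1, h2]
        have hrend : pvBRender (pvBPairs ((i, c) :: t) s d) (i, c) = String.ofList [c] := by
          simp [pvBRender, h1, h2]
        rw [hfold, hrec, List.map_cons, hrend, hstep]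
        simp

-- ===== VERDICT (by name: the statement is the Claim_ definition above) =====
theorem convert_structure_spec : Claim_equal_convert_structure := by
  intro secondary _ hpre
  unfold Spec_convert_structure convert_structure convert_structure_alt
  set l := PySem.List.enumerate secondary.toList 0 with hl
  have hbal : ∀ k : Nat, ((l.take k).map Prod.snd).count ')' ≤ ([] : List Int).length + ((l.take k).map Prod.snd).count '(' := by
    intro k
    have hsnd : (l.take k).map Prod.snd = secondary.toList.take k := by
      simp only [hl, List.map_take, PySem.List.map_snd_enumerate]
    rw [hsnd]
    simp only [List.length_nil, Nat.zero_add]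
    by_cases hk : k ≤ secondary.toList.length
    · exact hpre k (List.mem_range.mpr (Nat.lt_succ_of_le hk))
    · rw [List.take_of_length_le (by omega)]
      have := hpre secondary.toList.length (List.mem_range.mpr (Nat.lt_succ_of_le le_rfl))
      rwa [List.take_length] at this
  have := pvMain l [] PySem.Dict.empty []
    (by rw [hl]; exact PySem.List.pairwise_lt_enumerate secondary.toList 0)
    (by intro p _; exact PySem.Dict.get?_empty p.1) hbal
  rw [this]
  simp
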